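-- pv_equiv track=rewrite | github.com/jahzeel-ulises/eight-queens-puzzle | src/queens.py | function_cost
-- ===== SOURCE A (Python) =====
-- def check_collision(currentState:list,x:int,y:int,x_increment:int,y_increment:int)->int:
--     """Check if a queen threatens another in one direction."""
--     x += x_increment
--     y += y_increment
--
--     while (x >= 0 and x <= 7) and (y >=0 and y<=7):
--         if currentState[y] == x:
--             return 1
--         x += x_increment
--         y += y_increment
--     return 0
--
-- def function_cost(currentState:list)->int:
--     """Returns the total of colission of all queens."""
--     cost = 0
--     for i in range(8):
--         cost += check_collision(currentState,currentState[i],i,0,1)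
--         cost += check_collision(currentState,currentState[i],i,0,-1)
--         cost += check_collision(currentState,currentState[i],i,1,1)
--         cost += check_collision(currentState,currentState[i],i,1,-1)
--         cost += check_collision(currentState,currentState[i],i,-1,1)
--         cost += check_collision(currentState,currentState[i],i,-1,-1)
--     return cost
-- ===== SOURCE B (Python) =====
-- def function_cost(currentState):
--     queens = []
--     for y in range(8):
--         x = currentState[y]
--         if 0 <= x <= 7:
--             queens.append((y, x))
--     total = 0
--     for c in range(8):
--         k = sum(1 for (y, x) in queens if x == c)
--         if k:
--             total += 2 * (k - 1)
--     for d in range(-7, 8):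
--         k = sum(1 for (y, x) in queens if x - y == d)
--         if k:
--             total += 2 * (k - 1)
--     for a in range(15):
--         k = sum(1 for (y, x) in queens if x + y == a)
--         if k:
--             total += 2 * (k - 1)
--     return total
-- ===== Notes on version B (the rewrite author's own statement) =====
-- stated objective: simpler
-- what changed: Replaces the 48 per-queen directional ray walks with a single pass that collects on-board queens and then counts 2*(k-1) over each of the 30 lines (8 columns, 15 diagonals, 15 anti-diagonals by key), using the identity that per line with k queens A's per-direction existence bits sum to 2*(k-1).
-- intended difference: On inputs where some row i holds the off-board column -1 or 8 and another on-board queen sits on the half-diagonal A scans from the board edge, A counts phantom collisions for that off-board queen (e.g. [8,7,0,0,0,0,0,0] -> 11) while B ignores off-board queens entirely (-> 10), which is the intended behaviour since off-board queens are also invisible as targets in A. — e.g. on function_cost([8, 7, 0, 0, 0, 0, 0, 0]): A returns 11, B returns 10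
import Mathlib
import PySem

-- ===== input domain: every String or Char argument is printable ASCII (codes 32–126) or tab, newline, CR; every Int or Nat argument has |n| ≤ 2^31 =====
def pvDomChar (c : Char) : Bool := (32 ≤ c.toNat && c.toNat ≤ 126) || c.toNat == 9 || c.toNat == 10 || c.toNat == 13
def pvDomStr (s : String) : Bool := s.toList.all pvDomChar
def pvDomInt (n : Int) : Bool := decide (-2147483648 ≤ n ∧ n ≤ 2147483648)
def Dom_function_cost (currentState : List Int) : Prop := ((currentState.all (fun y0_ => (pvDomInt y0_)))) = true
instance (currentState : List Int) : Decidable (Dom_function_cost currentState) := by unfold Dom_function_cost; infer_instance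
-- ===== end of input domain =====

-- B replaces A's 48 per-queen directional ray walks by collecting the on-board queens once and
-- adding 2*(k-1) for each of the 30 board lines holding k queens (simpler, one grouping pass).

-- ===== PORT A =====
-- while-loop of check_collision; y moves by ±1 inside [0,7] at every call site, so the loop runs
-- at most 8 times and fuel 16 is never exhausted (the port is exact for A's calls).
def ccLoop (cs : List Int) (xinc yinc : Int) : Nat → Int → Int → Int
  | 0, _, _ => 0
  | fuel+1, x, y =>
    if (0 ≤ x ∧ x ≤ 7) ∧ (0 ≤ y ∧ y ≤ 7) then
      if PySem.List.pyGetD cs y 0 = x then 1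
      else ccLoop cs xinc yinc fuel (x + xinc) (y + yinc)
    else 0

def check_collision (currentState : List Int) (x y x_increment y_increment : Int) : Int :=
  ccLoop currentState x_increment y_increment 16 (x + x_increment) (y + y_increment)

def function_cost (currentState : List Int) : Int :=
  (PySem.List.pyRange 0 8 1).foldl (fun cost i =>
    let x := PySem.List.pyGetD currentState i 0
    cost + check_collision currentState x i 0 1
         + check_collision currentState x i 0 (-1)
         + check_collision currentState x i 1 1
         + check_collision currentState x i 1 (-1)
         + check_collision currentState x i (-1) 1
         + check_collision currentState x i (-1) (-1)) 0

-- ===== PORT B =====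
def function_cost_alt (currentState : List Int) : Int :=
  let queens : List (Int × Int) := (PySem.List.pyRange 0 8 1).foldl
    (fun acc y =>
      let x := PySem.List.pyGetD currentState y 0
      if 0 ≤ x ∧ x ≤ 7 then acc ++ [(y, x)] else acc) []
  let t1 := (PySem.List.pyRange 0 8 1).foldl (fun tot c =>
      let k : Int := queens.countP (fun q => q.2 == c)
      if k ≠ 0 then tot + 2 * (k - 1) else tot) 0
  let t2 := (PySem.List.pyRange (-7) 8 1).foldl (fun tot d =>
      let k : Int := queens.countP (fun q => q.2 - q.1 == d)
      if k ≠ 0 then tot + 2 * (k - 1) else tot) t1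
  (PySem.List.pyRange 0 15 1).foldl (fun tot a =>
      let k : Int := queens.countP (fun q => q.2 + q.1 == a)
      if k ≠ 0 then tot + 2 * (k - 1) else tot) t2

-- ===== PRECONDITION & SPEC =====
-- Python A (and B) index currentState[i] for i in range(8): IndexError on lists shorter than 8.
def Pre_function_cost (currentState : List Int) : Prop := 8 ≤ currentState.length
instance (currentState : List Int) : Decidable (Pre_function_cost currentState) := by
  unfold Pre_function_cost; infer_instance
def pvWitness_function_cost : List Int := [0, 1, 2, 3, 4, 5, 6, 7]

-- On inputs where some row i holds the off-board column -1 or 8 and another on-board queen sits on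
-- the half-diagonal A scans from the board edge, A counts phantom collisions for that off-board
-- queen, while B ignores off-board queens entirely — the intended behaviour, since off-board
-- queens are already invisible as targets in A.
def D_function_cost (currentState : List Int) : Prop :=
  ∃ i ∈ PySem.List.pyRange 0 8 1, ∃ j ∈ PySem.List.pyRange 0 8 1, i ≠ j ∧
    ((PySem.List.pyGetD currentState i 0 = -1 ∧
        PySem.List.pyGetD currentState j 0 = ((i - j).natAbs : Int) - 1) ∨
     (PySem.List.pyGetD currentState i 0 = 8 ∧
        PySem.List.pyGetD currentState j 0 = 8 - ((i - j).natAbs : Int)))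
instance (currentState : List Int) : Decidable (D_function_cost currentState) := by
  unfold D_function_cost; infer_instance

def Spec_function_cost (currentState : List Int) (out : Int) : Prop :=
  ¬ D_function_cost currentState → out = function_cost_alt currentState
instance (currentState : List Int) (out : Int) : Decidable (Spec_function_cost currentState out) := by
  unfold Spec_function_cost; infer_instance

def pvDiffWitness_function_cost : List Int := [8, 7, 0, 0, 0, 0, 0, 0]
def pvDiffWitnessOut_function_cost : Int × Int := (11, 10)

-- ===== CLAIM (what is proved, stated in full; the proofs are below) =====
def Claim_unchanged_function_cost : Prop := ∀ (currentState : List Int), Dom_function_cost currentState → Pre_function_cost currentState → Spec_function_cost currentState (function_cost currentState)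
def Claim_changed_function_cost : Prop := Dom_function_cost (pvDiffWitness_function_cost) ∧ Pre_function_cost (pvDiffWitness_function_cost) ∧ D_function_cost (pvDiffWitness_function_cost) ∧ function_cost (pvDiffWitness_function_cost) = pvDiffWitnessOut_function_cost.1 ∧ function_cost_alt (pvDiffWitness_function_cost) = pvDiffWitnessOut_function_cost.2 ∧ pvDiffWitnessOut_function_cost.1 ≠ pvDiffWitnessOut_function_cost.2

-- ===== LEMMAS AND PROOFS =====

def wCol (cs : List Int) (y : Int) : Option Int :=
  let x := PySem.List.pyGetD cs y 0
  if 0 ≤ x ∧ x ≤ 7 then some x else none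
def wDia (cs : List Int) (y : Int) : Option Int :=
  let x := PySem.List.pyGetD cs y 0
  if 0 ≤ x ∧ x ≤ 7 then some (x - y) else none
def wAnt (cs : List Int) (y : Int) : Option Int :=
  let x := PySem.List.pyGetD cs y 0
  if 0 ≤ x ∧ x ≤ 7 then some (x + y) else none

def rowHead (w : Int → Option Int) (rs seen : List Int) : Option Int → Int
  | none => 0
  | some k => (if k ∈ rs.filterMap w then 1 else 0) + (if k ∈ seen then 1 else 0)

def rowsGo (w : Int → Option Int) : List Int → List Int → Int
  | [], _ => 0
  | i :: rs, seen => rowHead w rs seen (w i) + rowsGo w rs (seen ++ (w i).toList)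

def rhsGo (L : List Int) : List Int → Int
  | [] => 0
  | k :: ks => (if (L.count k : Int) ≠ 0 then 2 * ((L.count k : Int) - 1) else 0) + rhsGo L ks

theorem ccLoop_col_up (cs : List Int) (fuel : Nat) (x y : Int) (hy : 0 ≤ y)
    (hf : 8 ≤ y + (fuel : Int)) :
    ccLoop cs 0 1 fuel x y =
      if (0 ≤ x ∧ x ≤ 7) ∧ ∃ j ∈ PySem.List.pyRange y 8 1, PySem.List.pyGetD cs j 0 = x
      then 1 else 0 := by
  induction fuel generalizing x y with
  | zero =>
    rw [PySem.List.pyRange_one_eq_nil (by push_cast at hf; omega)]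
    simp [ccLoop]
  | succ fuel ih =>
    rw [ccLoop]
    by_cases hb : (0 ≤ x ∧ x ≤ 7) ∧ (0 ≤ y ∧ y ≤ 7)
    · rw [if_pos hb]
      by_cases he : PySem.List.pyGetD cs y 0 = x
      · rw [if_pos he, if_pos]
        exact ⟨by omega, y, PySem.List.mem_pyRange_one.2 (by omega), by omega⟩
      · rw [if_neg he]
        have hrec := ih (x + 0) (y + 1) (by omega) (by push_cast at hf ⊢; omega)
        rw [hrec]
        refine if_congr ⟨?_, ?_⟩ rfl rfl
        · rintro ⟨hx, j, hj, h1⟩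
          have hmem := PySem.List.mem_pyRange_one.1 hj
          exact ⟨by omega, j, PySem.List.mem_pyRange_one.2 (by omega), by omega⟩
        · rintro ⟨hx, j, hj, h1⟩
          have hmem := PySem.List.mem_pyRange_one.1 hj
          by_cases hjy : j = y
          · subst hjy; exfalso; omega
          · exact ⟨by omega, j, PySem.List.mem_pyRange_one.2 (by omega), by omega⟩
    · rw [if_neg hb, if_neg]
      rintro ⟨hx, j, hj, h1⟩
      have := PySem.List.mem_pyRange_one.1 hj
      omega

theorem ccLoop_col_dn (cs : List Int) (fuel : Nat) (x z : Int) (hz : z ≤ 8)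
    (hf : z ≤ (fuel : Int)) :
    ccLoop cs 0 (-1) fuel x (z - 1) =
      if (0 ≤ x ∧ x ≤ 7) ∧ ∃ j ∈ PySem.List.pyRange 0 z 1, PySem.List.pyGetD cs j 0 = x
      then 1 else 0 := by
  induction fuel generalizing x z with
  | zero =>
    rw [PySem.List.pyRange_one_eq_nil (by push_cast at hf; omega)]
    simp [ccLoop]
  | succ fuel ih =>
    rw [ccLoop]
    by_cases hb : (0 ≤ x ∧ x ≤ 7) ∧ (0 ≤ z - 1 ∧ z - 1 ≤ 7)
    · rw [if_pos hb]
      by_cases he : PySem.List.pyGetD cs (z - 1) 0 = x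
      · rw [if_pos he, if_pos]
        exact ⟨by omega, z - 1, PySem.List.mem_pyRange_one.2 (by omega), by omega⟩
      · rw [if_neg he]
        have hrec := ih (x + 0) (z - 1) (by omega) (by push_cast at hf ⊢; omega)
        rw [show z - 1 + -1 = z - 1 - 1 from by ring, hrec]
        refine if_congr ⟨?_, ?_⟩ rfl rfl
        · rintro ⟨hx, j, hj, h1⟩
          have hmem := PySem.List.mem_pyRange_one.1 hj
          exact ⟨by omega, j, PySem.List.mem_pyRange_one.2 (by omega), by omega⟩
        · rintro ⟨hx, j, hj, h1⟩
          have hmem := PySem.List.mem_pyRange_one.1 hj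
          by_cases hjy : j = z - 1
          · subst hjy; exfalso; omega
          · exact ⟨by omega, j, PySem.List.mem_pyRange_one.2 (by omega), by omega⟩
    · rw [if_neg hb, if_neg]
      rintro ⟨hx, j, hj, h1⟩
      have := PySem.List.mem_pyRange_one.1 hj
      omega

theorem ccLoop_uu (cs : List Int) (fuel : Nat) (x y : Int) (hy : 0 ≤ y)
    (hf : 8 ≤ y + (fuel : Int)) :
    ccLoop cs 1 1 fuel x y =
      if 0 ≤ x ∧ ∃ j ∈ PySem.List.pyRange y 8 1, PySem.List.pyGetD cs j 0 = x + (j - y) ∧ x + (j - y) ≤ 7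
      then 1 else 0 := by
  induction fuel generalizing x y with
  | zero =>
    rw [PySem.List.pyRange_one_eq_nil (by push_cast at hf; omega)]
    simp [ccLoop]
  | succ fuel ih =>
    rw [ccLoop]
    by_cases hb : (0 ≤ x ∧ x ≤ 7) ∧ (0 ≤ y ∧ y ≤ 7)
    · rw [if_pos hb]
      by_cases he : PySem.List.pyGetD cs y 0 = x
      · rw [if_pos he, if_pos]
        exact ⟨by omega, y, PySem.List.mem_pyRange_one.2 (by omega), by omega, by omega⟩
      · rw [if_neg he]
        have hrec := ih (x + 1) (y + 1) (by omega) (by push_cast at hf ⊢; omega)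
        rw [hrec]
        refine if_congr ⟨?_, ?_⟩ rfl rfl
        · rintro ⟨hx, j, hj, h1, h2⟩
          have hmem := PySem.List.mem_pyRange_one.1 hj
          exact ⟨by omega, j, PySem.List.mem_pyRange_one.2 (by omega), by omega, by omega⟩
        · rintro ⟨hx, j, hj, h1, h2⟩
          have hmem := PySem.List.mem_pyRange_one.1 hj
          by_cases hjy : j = y
          · subst hjy; exfalso; omega
          · exact ⟨by omega, j, PySem.List.mem_pyRange_one.2 (by omega), by omega, by omega⟩
    · rw [if_neg hb, if_neg]
      rintro ⟨hx, j, hj, h1, h2⟩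
      have := PySem.List.mem_pyRange_one.1 hj
      omega

theorem ccLoop_ud (cs : List Int) (fuel : Nat) (x z : Int) (hz : z ≤ 8)
    (hf : z ≤ (fuel : Int)) :
    ccLoop cs 1 (-1) fuel x (z - 1) =
      if 0 ≤ x ∧ ∃ j ∈ PySem.List.pyRange 0 z 1, PySem.List.pyGetD cs j 0 = x + (z - 1 - j) ∧ x + (z - 1 - j) ≤ 7
      then 1 else 0 := by
  induction fuel generalizing x z with
  | zero =>
    rw [PySem.List.pyRange_one_eq_nil (by push_cast at hf; omega)]
    simp [ccLoop]
  | succ fuel ih =>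
    rw [ccLoop]
    by_cases hb : (0 ≤ x ∧ x ≤ 7) ∧ (0 ≤ z - 1 ∧ z - 1 ≤ 7)
    · rw [if_pos hb]
      by_cases he : PySem.List.pyGetD cs (z - 1) 0 = x
      · rw [if_pos he, if_pos]
        exact ⟨by omega, z - 1, PySem.List.mem_pyRange_one.2 (by omega), by omega, by omega⟩
      · rw [if_neg he]
        have hrec := ih (x + 1) (z - 1) (by omega) (by push_cast at hf ⊢; omega)
        rw [show z - 1 + -1 = z - 1 - 1 from by ring, hrec]
        refine if_congr ⟨?_, ?_⟩ rfl rfl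
        · rintro ⟨hx, j, hj, h1, h2⟩
          have hmem := PySem.List.mem_pyRange_one.1 hj
          exact ⟨by omega, j, PySem.List.mem_pyRange_one.2 (by omega), by omega, by omega⟩
        · rintro ⟨hx, j, hj, h1, h2⟩
          have hmem := PySem.List.mem_pyRange_one.1 hj
          by_cases hjy : j = z - 1
          · subst hjy; exfalso; omega
          · exact ⟨by omega, j, PySem.List.mem_pyRange_one.2 (by omega), by omega, by omega⟩
    · rw [if_neg hb, if_neg]
      rintro ⟨hx, j, hj, h1, h2⟩
      have := PySem.List.mem_pyRange_one.1 hj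
      omega

theorem ccLoop_du (cs : List Int) (fuel : Nat) (x y : Int) (hy : 0 ≤ y)
    (hf : 8 ≤ y + (fuel : Int)) :
    ccLoop cs (-1) 1 fuel x y =
      if x ≤ 7 ∧ ∃ j ∈ PySem.List.pyRange y 8 1, PySem.List.pyGetD cs j 0 = x - (j - y) ∧ 0 ≤ x - (j - y)
      then 1 else 0 := by
  induction fuel generalizing x y with
  | zero =>
    rw [PySem.List.pyRange_one_eq_nil (by push_cast at hf; omega)]
    simp [ccLoop]
  | succ fuel ih =>
    rw [ccLoop]
    by_cases hb : (0 ≤ x ∧ x ≤ 7) ∧ (0 ≤ y ∧ y ≤ 7)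
    · rw [if_pos hb]
      by_cases he : PySem.List.pyGetD cs y 0 = x
      · rw [if_pos he, if_pos]
        exact ⟨by omega, y, PySem.List.mem_pyRange_one.2 (by omega), by omega, by omega⟩
      · rw [if_neg he]
        have hrec := ih (x + (-1)) (y + 1) (by omega) (by push_cast at hf ⊢; omega)
        rw [hrec]
        refine if_congr ⟨?_, ?_⟩ rfl rfl
        · rintro ⟨hx, j, hj, h1, h2⟩
          have hmem := PySem.List.mem_pyRange_one.1 hj
          exact ⟨by omega, j, PySem.List.mem_pyRange_one.2 (by omega), by omega, by omega⟩
        · rintro ⟨hx, j, hj, h1, h2⟩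
          have hmem := PySem.List.mem_pyRange_one.1 hj
          by_cases hjy : j = y
          · subst hjy; exfalso; omega
          · exact ⟨by omega, j, PySem.List.mem_pyRange_one.2 (by omega), by omega, by omega⟩
    · rw [if_neg hb, if_neg]
      rintro ⟨hx, j, hj, h1, h2⟩
      have := PySem.List.mem_pyRange_one.1 hj
      omega

theorem ccLoop_dd (cs : List Int) (fuel : Nat) (x z : Int) (hz : z ≤ 8)
    (hf : z ≤ (fuel : Int)) :
    ccLoop cs (-1) (-1) fuel x (z - 1) =
      if x ≤ 7 ∧ ∃ j ∈ PySem.List.pyRange 0 z 1, PySem.List.pyGetD cs j 0 = x - (z - 1 - j) ∧ 0 ≤ x - (z - 1 - j)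
      then 1 else 0 := by
  induction fuel generalizing x z with
  | zero =>
    rw [PySem.List.pyRange_one_eq_nil (by push_cast at hf; omega)]
    simp [ccLoop]
  | succ fuel ih =>
    rw [ccLoop]
    by_cases hb : (0 ≤ x ∧ x ≤ 7) ∧ (0 ≤ z - 1 ∧ z - 1 ≤ 7)
    · rw [if_pos hb]
      by_cases he : PySem.List.pyGetD cs (z - 1) 0 = x
      · rw [if_pos he, if_pos]
        exact ⟨by omega, z - 1, PySem.List.mem_pyRange_one.2 (by omega), by omega, by omega⟩
      · rw [if_neg he]
        have hrec := ih (x + (-1)) (z - 1) (by omega) (by push_cast at hf ⊢; omega)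
        rw [show z - 1 + -1 = z - 1 - 1 from by ring, hrec]
        refine if_congr ⟨?_, ?_⟩ rfl rfl
        · rintro ⟨hx, j, hj, h1, h2⟩
          have hmem := PySem.List.mem_pyRange_one.1 hj
          exact ⟨by omega, j, PySem.List.mem_pyRange_one.2 (by omega), by omega, by omega⟩
        · rintro ⟨hx, j, hj, h1, h2⟩
          have hmem := PySem.List.mem_pyRange_one.1 hj
          by_cases hjy : j = z - 1
          · subst hjy; exfalso; omega
          · exact ⟨by omega, j, PySem.List.mem_pyRange_one.2 (by omega), by omega, by omega⟩
    · rw [if_neg hb, if_neg]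
      rintro ⟨hx, j, hj, h1, h2⟩
      have := PySem.List.mem_pyRange_one.1 hj
      omega

theorem length_filter_ne (L : List Int) (k : Int) :
    L.length = (L.filter (fun a => a ≠ k)).length + L.count k := by
  induction L with
  | nil => simp
  | cons b l ih =>
    by_cases hb : b = k
    · subst hb; simp [List.count_cons, ih]; omega
    · simp [List.count_cons, hb, ih]; omega

theorem count_filter_ne (L : List Int) (k a : Int) (h : a ≠ k) :
    (L.filter (fun b => b ≠ k)).count a = L.count a := by
  induction L with
  | nil => simp
  | cons b l ih =>
    by_cases hb : b = k
    · subst hb; simp [List.count_cons, Ne.symm h, ih, h]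
    · rw [List.filter_cons_of_pos (by simpa using hb), List.count_cons, List.count_cons, ih]

theorem card_filter_ne_mem (L : List Int) (k : Int) (h : k ∈ L) :
    L.toFinset.card = ((L.filter (fun a => a ≠ k)).toFinset.card) + 1 := by
  have h1 : (L.filter (fun a => a ≠ k)).toFinset = L.toFinset.erase k := by
    ext a; simp [List.mem_filter]; tauto
  rw [h1, Finset.card_erase_of_mem (List.mem_toFinset.2 h)]
  have : 1 ≤ L.toFinset.card := Finset.card_pos.2 ⟨k, List.mem_toFinset.2 h⟩
  omega

theorem card_filter_ne_not_mem (L : List Int) (k : Int) (h : k ∉ L) :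
    L.toFinset.card = ((L.filter (fun a => a ≠ k)).toFinset.card) := by
  congr 1
  ext a; simp [List.mem_filter]
  intro ha rfl; exact h ha

theorem rowsGo_eq (w : Int → Option Int) (rows : List Int) (seen : List Int) :
    rowsGo w rows seen =
      2 * ((rows.filterMap w).length : Int) - ((rows.filterMap w).toFinset.card : Int)
        - (((rows.filterMap w).toFinset \ seen.toFinset).card : Int) := by
  induction rows generalizing seen with
  | nil => simp [rowsGo]
  | cons i rs ih =>
    rw [rowsGo]
    cases h : w i with
    | none =>
      rw [List.filterMap_cons_none h]
      simp only [h, rowHead, Option.toList_none, List.append_nil]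
      rw [ih seen]; ring
    | some k =>
      rw [List.filterMap_cons_some h]
      simp only [h, rowHead, Option.toList_some]
      rw [ih (seen ++ [k])]
      have hfin : (k :: rs.filterMap w).toFinset = insert k (rs.filterMap w).toFinset := by simp
      have hsfin : (seen ++ [k]).toFinset = insert k seen.toFinset := by
        simp [List.toFinset_append]
      rw [hfin, hsfin]
      set F := (rs.filterMap w).toFinset with hF
      set S := seen.toFinset with hS
      have h1 : F \ insert k S = (F \ S).erase k := by
        ext a; simp [Finset.mem_sdiff, Finset.mem_erase]; tauto
      by_cases hkF : k ∈ F
      · have c1 : (insert k F).card = F.card := Finset.card_insert_of_mem hkF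
        have hkF' : k ∈ rs.filterMap w := List.mem_toFinset.1 hkF
        by_cases hkS : k ∈ S
        · have c2 : insert k F \ S = F \ S := Finset.insert_sdiff_of_mem F hkS
          have c3 : k ∉ F \ S := by simp [Finset.mem_sdiff, hkS]
          rw [c1, c2, h1, Finset.erase_eq_of_notMem c3]
          have hkseen : k ∈ seen := List.mem_toFinset.1 hkS
          simp [hkF', hkseen]
          push_cast; ring
        · have c2 : insert k F \ S = insert k (F \ S) := Finset.insert_sdiff_of_notMem F hkS
          have c3 : k ∈ F \ S := Finset.mem_sdiff.2 ⟨hkF, hkS⟩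
          rw [c1, c2, h1, Finset.card_erase_of_mem c3, Finset.insert_eq_self.2 c3]
          have hkseen : k ∉ seen := fun hc => hkS (List.mem_toFinset.2 hc)
          have hcard : 1 ≤ (F \ S).card := Finset.card_pos.2 ⟨k, c3⟩
          simp [hkF', hkseen]
          push_cast; omega
      · have c1 : (insert k F).card = F.card + 1 := Finset.card_insert_of_notMem hkF
        have hkF' : k ∉ rs.filterMap w := fun hc => hkF (List.mem_toFinset.2 hc)
        have c3 : k ∉ F \ S := by simp [Finset.mem_sdiff, hkF]
        rw [c1, h1, Finset.erase_eq_of_notMem c3]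
        by_cases hkS : k ∈ S
        · have c2 : insert k F \ S = F \ S := Finset.insert_sdiff_of_mem F hkS
          rw [c2]
          have hkseen : k ∈ seen := List.mem_toFinset.1 hkS
          simp [hkF', hkseen]
          push_cast; omega
        · have c2 : insert k F \ S = insert k (F \ S) := Finset.insert_sdiff_of_notMem F hkS
          rw [c2, Finset.card_insert_of_notMem c3]
          have hkseen : k ∉ seen := fun hc => hkS (List.mem_toFinset.2 hc)
          simp [hkF', hkseen]
          push_cast; omega

theorem rhsGo_congr (L L' : List Int) (K : List Int)
    (h : ∀ k ∈ K, L.count k = L'.count k) : rhsGo L K = rhsGo L' K := by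
  induction K with
  | nil => rfl
  | cons k ks ih =>
    rw [rhsGo, rhsGo, h k (List.mem_cons_self), ih (fun a ha => h a (List.mem_cons_of_mem _ ha))]

theorem rhsGo_eq (L : List Int) (K : List Int) (hnd : K.Nodup) (hsub : ∀ a ∈ L, a ∈ K) :
    rhsGo L K = 2 * (L.length : Int) - 2 * (L.toFinset.card : Int) := by
  induction K generalizing L with
  | nil =>
    have : L = [] := List.eq_nil_iff_forall_not_mem.2 (fun a ha => by simpa using hsub a ha)
    subst this; simp [rhsGo]
  | cons k ks ih =>
    rw [rhsGo]
    have hnd' := (List.nodup_cons.1 hnd).2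
    have hknks := (List.nodup_cons.1 hnd).1
    set L' := L.filter (fun a => a ≠ k) with hL'
    have hcnt : ∀ a ∈ ks, L.count a = L'.count a := by
      intro a ha
      have hak : a ≠ k := fun hc => hknks (hc ▸ ha)
      rw [hL', count_filter_ne L k a hak]
    have hsub' : ∀ a ∈ L', a ∈ ks := by
      intro a ha
      have h1 := List.mem_filter.1 ha
      have h2 := hsub a h1.1
      have h3 : a ≠ k := by simpa using h1.2
      rcases List.mem_cons.1 h2 with rfl | hmem; exacts [absurd rfl h3, hmem]
    rw [rhsGo_congr L L' ks hcnt, ih L' hnd' hsub']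
    have hlen : L.length = L'.length + L.count k := length_filter_ne L k
    by_cases hk : k ∈ L
    · have hfin := card_filter_ne_mem L k hk
      have hcpos : 0 < L.count k := List.count_pos_iff.2 hk
      rw [if_pos (by exact_mod_cast Nat.pos_iff_ne_zero.1 hcpos)]
      rw [hlen, hfin]
      push_cast
      ring
    · have hfin := card_filter_ne_not_mem L k hk
      have hczero : L.count k = 0 := List.count_eq_zero.2 hk
      rw [if_neg (by simp [hczero])]
      rw [hlen, hczero, ← hfin]
      push_cast
      ring

theorem sum_map_rhs (L : List Int) (K : List Int) :
    (K.map (fun k => if (L.count k : Int) ≠ 0 then 2 * ((L.count k : Int) - 1) else 0)).sum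
      = rhsGo L K := by
  induction K with
  | nil => rfl
  | cons k ks ih => rw [List.map_cons, List.sum_cons, ih, rhsGo]

theorem filterMap_ite (P : Int → Prop) [DecidablePred P] (g : Int → Int) (l : List Int) :
    l.filterMap (fun y => if P y then some (g y) else none)
      = (l.filter (fun y => decide (P y))).map g := by
  induction l with
  | nil => rfl
  | cons a l ih =>
    by_cases h : P a
    · rw [List.filterMap_cons_some (by rw [if_pos h]),
        List.filter_cons_of_pos (by simpa using h), List.map_cons, ih]
    · rw [List.filterMap_cons_none (by rw [if_neg h]),
        List.filter_cons_of_neg (by simpa using h), ih]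

theorem mem_fm_col (cs : List Int) (l : List Int) (k : Int) :
    k ∈ l.filterMap (wCol cs) ↔ ∃ j ∈ l, PySem.List.pyGetD cs j 0 = k ∧ 0 ≤ k ∧ k ≤ 7 := by
  rw [List.mem_filterMap]
  refine exists_congr fun j => and_congr_right fun hj => ?_
  simp only [wCol]
  by_cases hoj : 0 ≤ PySem.List.pyGetD cs j 0 ∧ PySem.List.pyGetD cs j 0 ≤ 7
  · rw [if_pos hoj]; constructor
    · intro h; have := Option.some.inj h; omega
    · rintro ⟨h1, h2, h3⟩; exact congrArg some (by omega)
  · rw [if_neg hoj]; constructor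
    · intro h; cases h
    · rintro ⟨h1, h2, h3⟩; exact absurd (by omega : 0 ≤ PySem.List.pyGetD cs j 0 ∧ PySem.List.pyGetD cs j 0 ≤ 7) hoj

theorem mem_fm_dia (cs : List Int) (l : List Int) (k : Int) :
    k ∈ l.filterMap (wDia cs) ↔ ∃ j ∈ l, PySem.List.pyGetD cs j 0 = k + j ∧ 0 ≤ k + j ∧ k + j ≤ 7 := by
  rw [List.mem_filterMap]
  refine exists_congr fun j => and_congr_right fun hj => ?_
  simp only [wDia]
  by_cases hoj : 0 ≤ PySem.List.pyGetD cs j 0 ∧ PySem.List.pyGetD cs j 0 ≤ 7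
  · rw [if_pos hoj]; constructor
    · intro h; have := Option.some.inj h; omega
    · rintro ⟨h1, h2, h3⟩; exact congrArg some (by omega)
  · rw [if_neg hoj]; constructor
    · intro h; cases h
    · rintro ⟨h1, h2, h3⟩; exact absurd (by omega : 0 ≤ PySem.List.pyGetD cs j 0 ∧ PySem.List.pyGetD cs j 0 ≤ 7) hoj

theorem mem_fm_ant (cs : List Int) (l : List Int) (k : Int) :
    k ∈ l.filterMap (wAnt cs) ↔ ∃ j ∈ l, PySem.List.pyGetD cs j 0 = k - j ∧ 0 ≤ k - j ∧ k - j ≤ 7 := by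
  rw [List.mem_filterMap]
  refine exists_congr fun j => and_congr_right fun hj => ?_
  simp only [wAnt]
  by_cases hoj : 0 ≤ PySem.List.pyGetD cs j 0 ∧ PySem.List.pyGetD cs j 0 ≤ 7
  · rw [if_pos hoj]; constructor
    · intro h; have := Option.some.inj h; omega
    · rintro ⟨h1, h2, h3⟩; exact congrArg some (by omega)
  · rw [if_neg hoj]; constructor
    · intro h; cases h
    · rintro ⟨h1, h2, h3⟩; exact absurd (by omega : 0 ≤ PySem.List.pyGetD cs j 0 ∧ PySem.List.pyGetD cs j 0 ≤ 7) hoj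

theorem bridgeA (cs : List Int) (hD : ¬ D_function_cost cs) :
    ∀ (n : Nat) (r : Int), r = 8 - (n : Int) → 0 ≤ r → ∀ acc : Int,
    (PySem.List.pyRange r 8 1).foldl
      (fun cost i =>
        let x := PySem.List.pyGetD cs i 0
        cost + check_collision cs x i 0 1 + check_collision cs x i 0 (-1)
          + check_collision cs x i 1 1 + check_collision cs x i 1 (-1)
          + check_collision cs x i (-1) 1 + check_collision cs x i (-1) (-1)) acc
    = acc
      + rowsGo (wCol cs) (PySem.List.pyRange r 8 1) ((PySem.List.pyRange 0 r 1).filterMap (wCol cs))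
      + rowsGo (wDia cs) (PySem.List.pyRange r 8 1) ((PySem.List.pyRange 0 r 1).filterMap (wDia cs))
      + rowsGo (wAnt cs) (PySem.List.pyRange r 8 1) ((PySem.List.pyRange 0 r 1).filterMap (wAnt cs)) := by
  intro n
  induction n with
  | zero =>
    intro r hr h0 acc
    rw [PySem.List.pyRange_one_eq_nil (by omega : (8:Int) ≤ r)]
    simp [rowsGo]
  | succ n ih =>
    intro r hr h0 acc
    have h8 : r < 8 := by push_cast at hr; omega
    rw [PySem.List.pyRange_one_cons h8, List.foldl_cons, rowsGo, rowsGo, rowsGo]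
    rw [ih (r + 1) (by push_cast at hr ⊢; omega) (by omega)]
    have hsplit : PySem.List.pyRange 0 (r + 1) 1 = PySem.List.pyRange 0 r 1 ++ [r] :=
      PySem.List.pyRange_one_succ_right h0
    have ht : ∀ w : Int → Option Int, List.filterMap w [r] = (w r).toList := by
      intro w; cases h : w r <;> simp [h]
    rw [hsplit, List.filterMap_append, List.filterMap_append, List.filterMap_append, ht, ht, ht]
    have hbeta : (let x := PySem.List.pyGetD cs r 0
        acc + check_collision cs x r 0 1 + check_collision cs x r 0 (-1)
          + check_collision cs x r 1 1 + check_collision cs x r 1 (-1)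
          + check_collision cs x r (-1) 1 + check_collision cs x r (-1) (-1))
      = acc + check_collision cs (PySem.List.pyGetD cs r 0) r 0 1
            + check_collision cs (PySem.List.pyGetD cs r 0) r 0 (-1)
            + check_collision cs (PySem.List.pyGetD cs r 0) r 1 1
            + check_collision cs (PySem.List.pyGetD cs r 0) r 1 (-1)
            + check_collision cs (PySem.List.pyGetD cs r 0) r (-1) 1
            + check_collision cs (PySem.List.pyGetD cs r 0) r (-1) (-1) := rfl
    rw [hbeta]
    set x := PySem.List.pyGetD cs r 0 with hx
    have hcc : ∀ dx dy : Int, check_collision cs x r dx dy = ccLoop cs dx dy 16 (x + dx) (r + dy) :=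
      fun _ _ => rfl
    rw [hcc, hcc, hcc, hcc, hcc, hcc]
    rw [show r + (1:Int) = r + 1 from rfl, show r + (-1:Int) = r - 1 from by ring]
    rw [ccLoop_col_up cs 16 (x + 0) (r + 1) (by omega) (by push_cast; omega),
        ccLoop_col_dn cs 16 (x + 0) r (by omega) (by push_cast; omega),
        ccLoop_uu cs 16 (x + 1) (r + 1) (by omega) (by push_cast; omega),
        ccLoop_ud cs 16 (x + 1) r (by omega) (by push_cast; omega),
        ccLoop_du cs 16 (x + -1) (r + 1) (by omega) (by push_cast; omega),
        ccLoop_dd cs 16 (x + -1) r (by omega) (by push_cast; omega)]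
    by_cases hOn : 0 ≤ x ∧ x ≤ 7
    · have hwc : wCol cs r = some x := by simp only [wCol]; rw [← hx, if_pos hOn]
      have hwd : wDia cs r = some (x - r) := by simp only [wDia]; rw [← hx, if_pos hOn]
      have hwa : wAnt cs r = some (x + r) := by simp only [wAnt]; rw [← hx, if_pos hOn]
      rw [hwc, hwd, hwa, rowHead, rowHead, rowHead]
      have e1 : ((0 ≤ x + 0 ∧ x + 0 ≤ 7) ∧
            ∃ j ∈ PySem.List.pyRange (r + 1) 8 1, PySem.List.pyGetD cs j 0 = x + 0)
          ↔ x ∈ (PySem.List.pyRange (r + 1) 8 1).filterMap (wCol cs) := by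
        rw [mem_fm_col]
        constructor
        · rintro ⟨h1, j, hj, h2⟩; exact ⟨j, hj, by omega, by omega, by omega⟩
        · rintro ⟨j, hj, h2, h3, h4⟩; exact ⟨by omega, j, hj, by omega⟩
      have e2 : ((0 ≤ x + 0 ∧ x + 0 ≤ 7) ∧
            ∃ j ∈ PySem.List.pyRange 0 r 1, PySem.List.pyGetD cs j 0 = x + 0)
          ↔ x ∈ (PySem.List.pyRange 0 r 1).filterMap (wCol cs) := by
        rw [mem_fm_col]
        constructor
        · rintro ⟨h1, j, hj, h2⟩; exact ⟨j, hj, by omega, by omega, by omega⟩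
        · rintro ⟨j, hj, h2, h3, h4⟩; exact ⟨by omega, j, hj, by omega⟩
      have e3 : (0 ≤ x + 1 ∧ ∃ j ∈ PySem.List.pyRange (r + 1) 8 1,
            PySem.List.pyGetD cs j 0 = x + 1 + (j - (r + 1)) ∧ x + 1 + (j - (r + 1)) ≤ 7)
          ↔ (x - r) ∈ (PySem.List.pyRange (r + 1) 8 1).filterMap (wDia cs) := by
        rw [mem_fm_dia]
        constructor
        · rintro ⟨h1, j, hj, h2, h3⟩
          have hmj := PySem.List.mem_pyRange_one.1 hj
          refine ⟨j, hj, by omega, by omega, by omega⟩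
        · rintro ⟨j, hj, h2, h3, h4⟩
          have hmj := PySem.List.mem_pyRange_one.1 hj
          refine ⟨by omega, j, hj, by omega, by omega⟩
      have e4 : (0 ≤ x + 1 ∧ ∃ j ∈ PySem.List.pyRange 0 r 1,
            PySem.List.pyGetD cs j 0 = x + 1 + (r - 1 - j) ∧ x + 1 + (r - 1 - j) ≤ 7)
          ↔ (x + r) ∈ (PySem.List.pyRange 0 r 1).filterMap (wAnt cs) := by
        rw [mem_fm_ant]
        constructor
        · rintro ⟨h1, j, hj, h2, h3⟩
          have hmj := PySem.List.mem_pyRange_one.1 hj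
          refine ⟨j, hj, by omega, by omega, by omega⟩
        · rintro ⟨j, hj, h2, h3, h4⟩
          have hmj := PySem.List.mem_pyRange_one.1 hj
          refine ⟨by omega, j, hj, by omega, by omega⟩
      have e5 : (x + -1 ≤ 7 ∧ ∃ j ∈ PySem.List.pyRange (r + 1) 8 1,
            PySem.List.pyGetD cs j 0 = x + -1 - (j - (r + 1)) ∧ 0 ≤ x + -1 - (j - (r + 1)))
          ↔ (x + r) ∈ (PySem.List.pyRange (r + 1) 8 1).filterMap (wAnt cs) := by
        rw [mem_fm_ant]
        constructor
        · rintro ⟨h1, j, hj, h2, h3⟩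
          have hmj := PySem.List.mem_pyRange_one.1 hj
          refine ⟨j, hj, by omega, by omega, by omega⟩
        · rintro ⟨j, hj, h2, h3, h4⟩
          have hmj := PySem.List.mem_pyRange_one.1 hj
          refine ⟨by omega, j, hj, by omega, by omega⟩
      have e6 : (x + -1 ≤ 7 ∧ ∃ j ∈ PySem.List.pyRange 0 r 1,
            PySem.List.pyGetD cs j 0 = x + -1 - (r - 1 - j) ∧ 0 ≤ x + -1 - (r - 1 - j))
          ↔ (x - r) ∈ (PySem.List.pyRange 0 r 1).filterMap (wDia cs) := by
        rw [mem_fm_dia]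
        constructor
        · rintro ⟨h1, j, hj, h2, h3⟩
          have hmj := PySem.List.mem_pyRange_one.1 hj
          refine ⟨j, hj, by omega, by omega, by omega⟩
        · rintro ⟨j, hj, h2, h3, h4⟩
          have hmj := PySem.List.mem_pyRange_one.1 hj
          refine ⟨by omega, j, hj, by omega, by omega⟩
      simp only [e1, e2, e3, e4, e5, e6]
      ring
    · have hwc : wCol cs r = none := by simp only [wCol]; rw [← hx, if_neg hOn]
      have hwd : wDia cs r = none := by simp only [wDia]; rw [← hx, if_neg hOn]
      have hwa : wAnt cs r = none := by simp only [wAnt]; rw [← hx, if_neg hOn]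
      rw [hwc, hwd, hwa, rowHead, rowHead, rowHead]
      have hmem8 : r ∈ PySem.List.pyRange 0 8 1 := PySem.List.mem_pyRange_one.2 (by omega)
      rw [if_neg (by rintro ⟨h1, _⟩; omega :
            ¬((0 ≤ x + 0 ∧ x + 0 ≤ 7) ∧
              ∃ j ∈ PySem.List.pyRange (r + 1) 8 1, PySem.List.pyGetD cs j 0 = x + 0))]
      rw [if_neg (by rintro ⟨h1, _⟩; omega :
            ¬((0 ≤ x + 0 ∧ x + 0 ≤ 7) ∧
              ∃ j ∈ PySem.List.pyRange 0 r 1, PySem.List.pyGetD cs j 0 = x + 0))]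
      rw [if_neg (by
            rintro ⟨h1, j, hj, h2, h3⟩
            have hmj := PySem.List.mem_pyRange_one.1 hj
            by_cases hxm : x = -1
            · exact hD ⟨r, hmem8, j, PySem.List.mem_pyRange_one.2 (by omega),
                by omega, Or.inl ⟨by omega, by omega⟩⟩
            · omega :
            ¬(0 ≤ x + 1 ∧ ∃ j ∈ PySem.List.pyRange (r + 1) 8 1,
              PySem.List.pyGetD cs j 0 = x + 1 + (j - (r + 1)) ∧ x + 1 + (j - (r + 1)) ≤ 7))]
      rw [if_neg (by
            rintro ⟨h1, j, hj, h2, h3⟩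
            have hmj := PySem.List.mem_pyRange_one.1 hj
            by_cases hxm : x = -1
            · exact hD ⟨r, hmem8, j, PySem.List.mem_pyRange_one.2 (by omega),
                by omega, Or.inl ⟨by omega, by omega⟩⟩
            · omega :
            ¬(0 ≤ x + 1 ∧ ∃ j ∈ PySem.List.pyRange 0 r 1,
              PySem.List.pyGetD cs j 0 = x + 1 + (r - 1 - j) ∧ x + 1 + (r - 1 - j) ≤ 7))]
      rw [if_neg (by
            rintro ⟨h1, j, hj, h2, h3⟩
            have hmj := PySem.List.mem_pyRange_one.1 hj
            by_cases hxm : x = 8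
            · exact hD ⟨r, hmem8, j, PySem.List.mem_pyRange_one.2 (by omega),
                by omega, Or.inr ⟨by omega, by omega⟩⟩
            · omega :
            ¬(x + -1 ≤ 7 ∧ ∃ j ∈ PySem.List.pyRange (r + 1) 8 1,
              PySem.List.pyGetD cs j 0 = x + -1 - (j - (r + 1)) ∧ 0 ≤ x + -1 - (j - (r + 1))))]
      rw [if_neg (by
            rintro ⟨h1, j, hj, h2, h3⟩
            have hmj := PySem.List.mem_pyRange_one.1 hj
            by_cases hxm : x = 8
            · exact hD ⟨r, hmem8, j, PySem.List.mem_pyRange_one.2 (by omega),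
                by omega, Or.inr ⟨by omega, by omega⟩⟩
            · omega :
            ¬(x + -1 ≤ 7 ∧ ∃ j ∈ PySem.List.pyRange 0 r 1,
              PySem.List.pyGetD cs j 0 = x + -1 - (r - 1 - j) ∧ 0 ≤ x + -1 - (r - 1 - j)))]
      ring

theorem bridgeB (cs : List Int) :
    function_cost_alt cs =
      rhsGo ((PySem.List.pyRange 0 8 1).filterMap (wCol cs)) (PySem.List.pyRange 0 8 1)
    + rhsGo ((PySem.List.pyRange 0 8 1).filterMap (wDia cs)) (PySem.List.pyRange (-7) 8 1)
    + rhsGo ((PySem.List.pyRange 0 8 1).filterMap (wAnt cs)) (PySem.List.pyRange 0 15 1) := by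
  have hq : (PySem.List.pyRange 0 8 1).foldl
      (fun acc y =>
        let x := PySem.List.pyGetD cs y 0
        if 0 ≤ x ∧ x ≤ 7 then acc ++ [(y, x)] else acc) []
      = ((PySem.List.pyRange 0 8 1).filter
          (fun y => decide (0 ≤ PySem.List.pyGetD cs y 0 ∧ PySem.List.pyGetD cs y 0 ≤ 7))).map
          (fun y => (y, PySem.List.pyGetD cs y 0)) := by
    have hbody : (fun (acc : List (Int × Int)) (y : Int) =>
        let x := PySem.List.pyGetD cs y 0
        if 0 ≤ x ∧ x ≤ 7 then acc ++ [(y, x)] else acc)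
      = (fun acc y =>
        if (fun y => decide (0 ≤ PySem.List.pyGetD cs y 0 ∧ PySem.List.pyGetD cs y 0 ≤ 7)) y = true
        then acc ++ [(fun y => (y, PySem.List.pyGetD cs y 0)) y] else acc) := by
      funext acc y
      simp only [decide_eq_true_eq]
    rw [hbody, PySem.List.foldl_append_if]
    simp
  set Q := ((PySem.List.pyRange 0 8 1).filter
      (fun y => decide (0 ≤ PySem.List.pyGetD cs y 0 ∧ PySem.List.pyGetD cs y 0 ≤ 7))).map
      (fun y => (y, PySem.List.pyGetD cs y 0)) with hQ
  have hcntC : ∀ c : Int, (Q.countP (fun q => q.2 == c))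
      = ((PySem.List.pyRange 0 8 1).filterMap (wCol cs)).count c := by
    intro c
    rw [show wCol cs = (fun y => if 0 ≤ PySem.List.pyGetD cs y 0 ∧ PySem.List.pyGetD cs y 0 ≤ 7
        then some (PySem.List.pyGetD cs y 0) else none) from funext fun y => rfl]
    rw [filterMap_ite, hQ, List.count, List.countP_map, List.countP_map]
    rfl
  have hcntD : ∀ d : Int, (Q.countP (fun q => q.2 - q.1 == d))
      = ((PySem.List.pyRange 0 8 1).filterMap (wDia cs)).count d := by
    intro d
    rw [show wDia cs = (fun y => if 0 ≤ PySem.List.pyGetD cs y 0 ∧ PySem.List.pyGetD cs y 0 ≤ 7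
        then some (PySem.List.pyGetD cs y 0 - y) else none) from funext fun y => rfl]
    rw [filterMap_ite, hQ, List.count, List.countP_map, List.countP_map]
    rfl
  have hcntA : ∀ a : Int, (Q.countP (fun q => q.2 + q.1 == a))
      = ((PySem.List.pyRange 0 8 1).filterMap (wAnt cs)).count a := by
    intro a
    rw [show wAnt cs = (fun y => if 0 ≤ PySem.List.pyGetD cs y 0 ∧ PySem.List.pyGetD cs y 0 ≤ 7
        then some (PySem.List.pyGetD cs y 0 + y) else none) from funext fun y => rfl]
    rw [filterMap_ite, hQ, List.count, List.countP_map, List.countP_map]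
    rfl
  have hfold : ∀ (K : List Int) (cnt : Int → Nat) (L : List Int),
      (∀ c, cnt c = L.count c) → ∀ init : Int,
      K.foldl (fun tot c => if ((cnt c : Int)) ≠ 0 then tot + 2 * ((cnt c : Int) - 1) else tot) init
        = init + rhsGo L K := by
    intro K cnt L hc init
    have hbody : (fun (tot : Int) (c : Int) =>
        if ((cnt c : Int)) ≠ 0 then tot + 2 * ((cnt c : Int) - 1) else tot)
      = (fun tot c => tot +
          (if ((L.count c : Int)) ≠ 0 then 2 * ((L.count c : Int) - 1) else 0)) := by
      funext tot c
      rw [hc c]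
      by_cases h : ((L.count c : Int)) ≠ 0
      · rw [if_pos h, if_pos h]
      · rw [if_neg h, if_neg h]; ring
    rw [hbody,
      PySem.List.foldl_add K (fun c => if ((L.count c : Int)) ≠ 0 then 2 * ((L.count c : Int) - 1) else 0) init,
      sum_map_rhs]
  simp only [function_cost_alt]
  rw [hq]
  rw [hfold (PySem.List.pyRange 0 8 1) _ _ hcntC,
      hfold (PySem.List.pyRange (-7) 8 1) _ _ hcntD,
      hfold (PySem.List.pyRange 0 15 1) _ _ hcntA]
  ring

-- ===== VERDICT (by name: the statement is the Claim_ definition above) =====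
theorem function_cost_spec : Claim_unchanged_function_cost := by
  unfold Claim_unchanged_function_cost
  intro cs hDom hPre
  unfold Spec_function_cost
  intro hD
  have hA := bridgeA cs hD 8 0 (by norm_num) (by norm_num) 0
  rw [PySem.List.pyRange_one_eq_nil (le_refl (0 : Int))] at hA
  simp only [List.filterMap_nil] at hA
  have hA' : function_cost cs
      = 0 + rowsGo (wCol cs) (PySem.List.pyRange 0 8 1) []
          + rowsGo (wDia cs) (PySem.List.pyRange 0 8 1) []
          + rowsGo (wAnt cs) (PySem.List.pyRange 0 8 1) [] := by
    rw [function_cost]; exact hA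
  have hndC : (PySem.List.pyRange 0 8 1).Nodup := (PySem.List.nodup_pyRange_one _ _)
  have hndD : (PySem.List.pyRange (-7) 8 1).Nodup := (PySem.List.nodup_pyRange_one _ _)
  have hndA : (PySem.List.pyRange 0 15 1).Nodup := (PySem.List.nodup_pyRange_one _ _)
  have hsubC : ∀ a ∈ (PySem.List.pyRange 0 8 1).filterMap (wCol cs),
      a ∈ PySem.List.pyRange 0 8 1 := by
    intro a ha
    rw [mem_fm_col] at ha
    obtain ⟨j, hj, h1, h2, h3⟩ := ha
    exact PySem.List.mem_pyRange_one.2 (by omega)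
  have hsubD : ∀ a ∈ (PySem.List.pyRange 0 8 1).filterMap (wDia cs),
      a ∈ PySem.List.pyRange (-7) 8 1 := by
    intro a ha
    rw [mem_fm_dia] at ha
    obtain ⟨j, hj, h1, h2, h3⟩ := ha
    have := PySem.List.mem_pyRange_one.1 hj
    exact PySem.List.mem_pyRange_one.2 (by omega)
  have hsubA : ∀ a ∈ (PySem.List.pyRange 0 8 1).filterMap (wAnt cs),
      a ∈ PySem.List.pyRange 0 15 1 := by
    intro a ha
    rw [mem_fm_ant] at ha
    obtain ⟨j, hj, h1, h2, h3⟩ := ha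
    have := PySem.List.mem_pyRange_one.1 hj
    exact PySem.List.mem_pyRange_one.2 (by omega)
  rw [hA', bridgeB cs, rowsGo_eq, rowsGo_eq, rowsGo_eq,
    rhsGo_eq _ _ hndC hsubC, rhsGo_eq _ _ hndD hsubD, rhsGo_eq _ _ hndA hsubA]
  simp only [List.toFinset_nil, Finset.sdiff_empty]
  ring

theorem function_cost_changed : Claim_changed_function_cost := by
  unfold Claim_changed_function_cost; decide
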